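-- pv_equiv track=rewrite | github.com/JH201421228/TIL | self/202509/20250903/boj_17134/2nd.py | bitrev_table
-- ===== SOURCE A (Python) =====
-- def bitrev_table(n: int):
--     lg = (n.bit_length() - 1)
--     rev = list(range(n))
--     for i in range(n):
--         x = i
--         r = 0
--         for _ in range(lg):
--             r = (r << 1) | (x & 1)
--             x >>= 1
--         rev[i] = r
--     return rev
-- ===== SOURCE B (Python) =====
-- def bitrev_table(n: int):
--     if n <= 0:
--         return []
--     lg = n.bit_length() - 1
--     half = 2 ** (lg - 1) if lg > 0 else 0
--     rev = [0] * n
--     for i in range(1, n):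
--         rev[i] = rev[i // 2] // 2 + (i % 2) * half
--     return rev
-- ===== Notes on version B (the rewrite author's own statement) =====
-- stated objective: faster
-- what changed: Replaces A's per-index inner loop that reverses lg bits one at a time by a single-pass dynamic-programming recurrence rev[i] = rev[i//2]//2 + (i%2)*2^(lg-1), filling the table in one O(n) sweep.
import Mathlib
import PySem

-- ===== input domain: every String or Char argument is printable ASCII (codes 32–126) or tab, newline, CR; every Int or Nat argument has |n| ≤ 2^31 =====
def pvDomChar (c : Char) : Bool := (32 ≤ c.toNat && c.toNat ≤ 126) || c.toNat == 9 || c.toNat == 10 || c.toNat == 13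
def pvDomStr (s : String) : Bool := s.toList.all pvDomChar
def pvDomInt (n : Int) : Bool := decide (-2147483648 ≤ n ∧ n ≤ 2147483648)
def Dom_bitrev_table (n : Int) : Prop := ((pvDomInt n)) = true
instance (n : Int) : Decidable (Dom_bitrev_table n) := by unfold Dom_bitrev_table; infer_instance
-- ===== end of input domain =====

-- B replaces A's per-index O(log n) inner bit-reversal loop by the O(1) recurrence
-- rev[i] = rev[i//2]//2 + (i%2)*2^(lg-1), an asymptotically faster algorithm (O(n) vs O(n log n)).

-- ===== PORT A =====
def bitrev_table (n : Int) : List Int :=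
  let lg : Int := (PySem.Int.bitLength n : Int) - 1
  let rev : List Int := PySem.List.pyRange 0 n 1
  (PySem.List.pyRange 0 n 1).foldl (fun rev i =>
    let xr : Int × Int := (PySem.List.pyRange 0 lg 1).foldl
      (fun xr _ => (xr.1 >>> (1 : Nat), PySem.Int.bor (xr.2 <<< (1 : Nat)) (PySem.Int.band xr.1 1)))
      (i, 0)
    PySem.List.pySetD rev i xr.2) rev

-- ===== PORT B =====
def bitrev_table_alt (n : Int) : List Int :=
  if n ≤ 0 then []
  else
    let lg : Int := (PySem.Int.bitLength n : Int) - 1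
    let half : Int := if 0 < lg then 2 ^ (lg - 1).toNat else 0
    let rev : List Int := List.replicate n.toNat 0
    (PySem.List.pyRange 1 n 1).foldl (fun rev i =>
      PySem.List.pySetD rev i
        (PySem.Int.floordiv (PySem.List.pyGetD rev (PySem.Int.floordiv i 2) 0) 2
          + PySem.Int.mod i 2 * half)) rev

-- ===== PRECONDITION & SPEC =====
def Spec_bitrev_table (n : Int) (out : List Int) : Prop := out = bitrev_table_alt n
instance (n : Int) (out : List Int) : Decidable (Spec_bitrev_table n out) := by unfold Spec_bitrev_table; infer_instance

-- ===== CLAIM (what is proved, stated in full; the proofs are below) =====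
def Claim_equal_bitrev_table : Prop := ∀ (n : Int), Dom_bitrev_table n → Spec_bitrev_table n (bitrev_table n)

-- ===== LEMMAS AND PROOFS =====

/-- Reversal of the low `k` bits of `x`, accumulated LSB-first exactly as A's inner loop does. -/
def revbits : Nat → Nat → Nat
  | 0, _ => 0
  | k+1, x => 2 * revbits k x + x / 2 ^ k % 2

theorem revbits_zero (k : Nat) : revbits k 0 = 0 := by
  induction k with
  | zero => rfl
  | succ k ih => simp [revbits, ih]

theorem lor_two_mul (a b : Nat) (hb : b ≤ 1) : (2 * a) ||| b = 2 * a + b := by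
  interval_cases b
  · simp
  · have h := Nat.lor_bit false a true 0
    simp [Nat.bit] at h
    omega

/-- A's inner loop, run `k` times from `(x, r)`. -/
theorem innerA (k x r : Nat) :
    (PySem.List.pyRange 0 (k : Int) 1).foldl
      (fun (xr : Int × Int) _ => (xr.1 >>> (1 : Nat), PySem.Int.bor (xr.2 <<< (1 : Nat)) (PySem.Int.band xr.1 1)))
      ((x : Int), (r : Int))
    = (((x / 2 ^ k : Nat) : Int), ((r * 2 ^ k + revbits k x : Nat) : Int)) := by
  induction k with
  | zero => simp [PySem.List.pyRange_one_eq_nil, revbits]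
  | succ k ih =>
    have hcast : ((k + 1 : Nat) : Int) = (k : Int) + 1 := by push_cast; ring
    rw [hcast, PySem.List.pyRange_one_succ_right (by positivity), List.foldl_append, ih]
    simp only [List.foldl_cons, List.foldl_nil]
    refine Prod.ext ?_ ?_
    · show ((x / 2 ^ k : Nat) : Int) >>> (1:Nat) = _
      have h1 : ((x / 2 ^ k : Nat) : Int) >>> (1:Nat) = (((x / 2 ^ k) >>> 1 : Nat) : Int) := by simp
      rw [h1]
      congr 1
      rw [Nat.shiftRight_eq_div_pow, pow_one, Nat.div_div_eq_div_mul, pow_succ]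
    · show PySem.Int.bor (((r * 2 ^ k + revbits k x : Nat) : Int) <<< (1:Nat)) (PySem.Int.band ((x / 2 ^ k : Nat) : Int) 1) = _
      have h2 : (((r * 2 ^ k + revbits k x : Nat) : Int)) <<< (1:Nat) = (((r * 2 ^ k + revbits k x) <<< 1 : Nat) : Int) := by simp
      have h3 : (1 : Int) = ((1 : Nat) : Int) := rfl
      rw [h2, h3, PySem.Int.band_natCast, PySem.Int.bor_natCast]
      congr 1
      rw [Nat.and_one_is_mod, Nat.shiftLeft_eq, pow_one, Nat.mul_comm _ 2,
        lor_two_mul _ _ (by omega)]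
      have h4 : revbits (k+1) x = 2 * revbits k x + x / 2 ^ k % 2 := rfl
      rw [h4]
      ring

theorem foldl_set_range {α : Type} (f : Nat → α) (k : Nat) :
    ∀ (L : List α), k ≤ L.length →
      (List.range k).foldl (fun acc i => acc.set i (f i)) L = (List.range k).map f ++ L.drop k := by
  induction k with
  | zero => intro L _; simp
  | succ k ih =>
    intro L hk
    rw [List.range_succ, List.foldl_append, ih L (by omega)]
    simp only [List.foldl_cons, List.foldl_nil, List.map_append, List.map_cons, List.map_nil]
    rw [List.drop_eq_getElem_cons (show k < L.length by omega), List.set_append]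
    simp
    have hd : List.drop k L = L[k] :: List.drop (k+1) L := List.drop_eq_getElem_cons (by omega)
    rw [hd]
    rfl

theorem bitLength_pos (n : Int) (hn : 0 < n) : 1 ≤ PySem.Int.bitLength n := by
  rw [PySem.Int.bitLength_of_pos hn]; omega

theorem bitLength_two_le (n : Int) (hn : 2 ≤ n) : 2 ≤ PySem.Int.bitLength n := by
  rw [PySem.Int.bitLength_of_pos (by omega : (0:Int) < n)]
  have h2 : (0:Int) < PySem.Int.floordiv n 2 := by
    have := PySem.Int.floordiv_eq_ediv_of_pos (a := n) (b := 2) (by omega)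
    rw [this]; omega
  have := bitLength_pos _ h2
  omega

/-- Characterisation of A's output. -/
theorem A_char (n : Int) (hn : 0 < n) :
    bitrev_table n
      = (List.range n.toNat).map (fun k => ((revbits (PySem.Int.bitLength n - 1) k : Nat) : Int)) := by
  have hbl := bitLength_pos n hn
  have hlg : ((PySem.Int.bitLength n : Int)) - 1 = ((PySem.Int.bitLength n - 1 : Nat) : Int) := by
    rw [Nat.cast_sub hbl, Nat.cast_one]
  unfold bitrev_table
  simp only [hlg]
  have hrange : PySem.List.pyRange 0 n 1 = (List.range n.toNat).map (fun k => ((k : Nat) : Int)) := by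
    rw [PySem.List.pyRange_one]
    simp
  rw [hrange, List.foldl_map]
  have hfun : (fun (acc : List Int) (k : Nat) =>
      PySem.List.pySetD acc ((k : Nat) : Int)
        (((PySem.List.pyRange 0 ((PySem.Int.bitLength n - 1 : Nat) : Int) 1).foldl
          (fun (xr : Int × Int) _ =>
            (xr.1 >>> (1 : Nat), PySem.Int.bor (xr.2 <<< (1 : Nat)) (PySem.Int.band xr.1 1)))
          (((k : Nat) : Int), 0)).2))
      = (fun (acc : List Int) (k : Nat) =>
          acc.set k ((revbits (PySem.Int.bitLength n - 1) k : Nat) : Int)) := by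
    funext acc k
    have h0 : ((0 : Nat) : Int) = (0 : Int) := rfl
    have hi := innerA (PySem.Int.bitLength n - 1) k 0
    rw [h0] at hi
    rw [hi]
    simp
  rw [hfun]
  rw [foldl_set_range _ n.toNat _ (by simp)]
  simp

theorem revbits_alt (k : Nat) : ∀ x : Nat, revbits (k+1) x = x % 2 * 2 ^ k + revbits k (x / 2) := by
  induction k with
  | zero => intro x; simp [revbits]
  | succ k ih =>
    intro x
    have h1 : revbits (k+2) x = 2 * revbits (k+1) x + x / 2 ^ (k+1) % 2 := rfl
    have h2 : revbits (k+1) (x/2) = 2 * revbits k (x/2) + (x/2) / 2 ^ k % 2 := rfl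
    have h3 : x / 2 ^ (k+1) = x / 2 / 2 ^ k := by
      rw [Nat.div_div_eq_div_mul, pow_succ, Nat.mul_comm]
    rw [h1, ih x, h2, h3]
    ring

theorem revbits_key (k x : Nat) :
    revbits (k+1) x = revbits (k+1) (x / 2) / 2 + x % 2 * 2 ^ k := by
  have h : revbits (k+1) (x/2) = 2 * revbits k (x/2) + (x/2) / 2 ^ k % 2 := rfl
  have := revbits_alt k x
  omega

/-- Invariant of B's fill loop: after processing indices 1..m, the first m+1 cells hold
`revbits` and the rest are still zero. -/
theorem B_inv (N lgN : Nat) (half : Int) (hN : 1 ≤ N) (hlg : 2 ≤ N → 1 ≤ lgN)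
    (hhalf : 1 ≤ lgN → half = ((2 ^ (lgN - 1) : Nat) : Int)) :
    ∀ m, m ≤ N - 1 →
      (List.range m).foldl
        (fun (acc : List Int) (k : Nat) =>
          PySem.List.pySetD acc (1 + (k : Int))
            (PySem.Int.floordiv (PySem.List.pyGetD acc (PySem.Int.floordiv (1 + (k : Int)) 2) 0) 2
              + PySem.Int.mod (1 + (k : Int)) 2 * half))
        (List.replicate N (0 : Int))
      = (List.range (m + 1)).map (fun k => ((revbits lgN k : Nat) : Int))
          ++ List.replicate (N - (m + 1)) (0 : Int) := by
  intro m
  induction m with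
  | zero =>
    intro _
    obtain ⟨N', rfl⟩ : ∃ N', N = N' + 1 := ⟨N - 1, by omega⟩
    simp [List.replicate_succ, revbits_zero]
  | succ m ih =>
    intro hm
    have hN2 : 2 ≤ N := by omega
    have hlg1 : 1 ≤ lgN := hlg hN2
    rw [List.range_succ, List.foldl_append, ih (by omega)]
    simp only [List.foldl_cons, List.foldl_nil]
    have hc : 1 + (m : Int) = ((m + 1 : Nat) : Int) := by push_cast; ring
    have hfd : PySem.Int.floordiv ((m + 1 : Nat) : Int) 2 = (((m + 1) / 2 : Nat) : Int) := by
      exact_mod_cast PySem.Int.floordiv_natCast (m + 1) 2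
    have hmod : PySem.Int.mod ((m + 1 : Nat) : Int) 2 = (((m + 1) % 2 : Nat) : Int) := by
      exact_mod_cast PySem.Int.mod_natCast (m + 1) 2
    set acc := (List.range (m + 1)).map (fun k => ((revbits lgN k : Nat) : Int))
        ++ List.replicate (N - (m + 1)) (0 : Int) with hacc
    have hget : PySem.List.pyGetD acc (((m + 1) / 2 : Nat) : Int) 0
        = ((revbits lgN ((m + 1) / 2) : Nat) : Int) := by
      rw [PySem.List.pyGetD_natCast]
      have hlt : (m + 1) / 2 < ((List.range (m + 1)).map
          (fun k => ((revbits lgN k : Nat) : Int))).length := by simp; omega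
      rw [hacc, List.getD_append _ _ _ _ hlt, List.getD_eq_getElem _ _ (by simpa using hlt)]
      simp
    have hfd2 : PySem.Int.floordiv ((revbits lgN ((m + 1) / 2) : Nat) : Int) 2
        = ((revbits lgN ((m + 1) / 2) / 2 : Nat) : Int) := by
      exact_mod_cast PySem.Int.floordiv_natCast (revbits lgN ((m + 1) / 2)) 2
    have hval : ((revbits lgN ((m + 1) / 2) / 2 : Nat) : Int)
          + (((m + 1) % 2 : Nat) : Int) * half
        = ((revbits lgN (m + 1) : Nat) : Int) := by
      rw [hhalf hlg1]
      have hk : lgN = (lgN - 1) + 1 := by omega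
      have := revbits_key (lgN - 1) (m + 1)
      rw [hk]
      push_cast
      rw [this]
      push_cast
      ring
    rw [hc, hfd, hget, hfd2, hmod, hval, PySem.List.pySetD_natCast]
    have hlen : ((List.range (m + 1)).map (fun k => ((revbits lgN k : Nat) : Int))).length
        = m + 1 := by simp
    obtain ⟨R, hR⟩ : ∃ R, N - (m + 1) = R + 1 := ⟨N - (m + 2), by omega⟩
    rw [hacc, hR, List.replicate_succ, List.set_append]
    simp only [hlen]
    rw [if_neg (by omega)]
    simp only [Nat.sub_self, List.set_cons_zero]
    rw [List.range_succ]
    simp only [List.map_append, List.map_cons, List.map_nil]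
    rw [show N - (m + 1 + 1) = R from by omega]
    simp [List.range_succ]

/-- Characterisation of B's output. -/
theorem B_char (n : Int) (hn : 0 < n) :
    bitrev_table_alt n
      = (List.range n.toNat).map (fun k => ((revbits (PySem.Int.bitLength n - 1) k : Nat) : Int)) := by
  have hbl := bitLength_pos n hn
  unfold bitrev_table_alt
  rw [if_neg (by omega)]
  rw [PySem.List.pyRange_one]
  rw [show ((n : Int) - 1).toNat = n.toNat - 1 from by omega]
  rw [List.foldl_map]
  have hmain := B_inv n.toNat (PySem.Int.bitLength n - 1)
    (if 0 < (PySem.Int.bitLength n : Int) - 1 then 2 ^ (((PySem.Int.bitLength n : Int) - 1) - 1).toNat else 0)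
    (by omega)
    (by
      intro h2
      have := bitLength_two_le n (by omega)
      omega)
    (by
      intro h1
      rw [if_pos (by exact_mod_cast by omega : (0:Int) < (PySem.Int.bitLength n : Int) - 1)]
      have : (((PySem.Int.bitLength n : Int) - 1) - 1).toNat = PySem.Int.bitLength n - 1 - 1 := by omega
      rw [this]
      push_cast
      ring)
    (n.toNat - 1) (by omega)
  rw [show n.toNat - 1 + 1 = n.toNat from by omega] at hmain
  simp only [Nat.sub_self, List.replicate_zero, List.append_nil] at hmain
  exact hmain

-- ===== VERDICT (by name: the statement is the Claim_ definition above) =====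
theorem bitrev_table_spec : Claim_equal_bitrev_table := by
  intro n _
  unfold Spec_bitrev_table
  rcases le_or_gt n 0 with h | h
  · have hA : bitrev_table n = [] := by
      unfold bitrev_table
      simp [PySem.List.pyRange_one_eq_nil h]
    have hB : bitrev_table_alt n = [] := by
      unfold bitrev_table_alt
      simp [h]
    rw [hA, hB]
  · rw [A_char n h, B_char n h]
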